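-- pv_equiv track=rewrite | github.com/ychebotarev/python_practice | q_08.py | solve
-- ===== SOURCE A (Python) =====
-- def solve(ar):
--     ar1 = sorted(ar)
--     h = {}
--     for i in range(len(ar1)):
--         h[ar1[i]] = i
--
--     result = []
--     for i in range(len(ar1)):
--         result.append(h[ar[i]])
--     return result
-- ===== SOURCE B (Python) =====
-- def solve(ar):
--     # rank of each element = number of elements <= it, minus 1 (no sort, no dict)
--     result = []
--     for a in ar:
--         c = 0
--         for x in ar:
--             if x <= a:
--                 c += 1
--         result.append(c - 1)
--     return result
-- ===== Notes on version B (the rewrite author's own statement) =====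
-- stated objective: alternative
-- what changed: B replaces A's sort-then-dict-of-last-indices construction by a direct counting pass: result[i] is the number of elements <= ar[i] minus 1, which equals the last sorted position of ar[i].
import Mathlib
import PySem

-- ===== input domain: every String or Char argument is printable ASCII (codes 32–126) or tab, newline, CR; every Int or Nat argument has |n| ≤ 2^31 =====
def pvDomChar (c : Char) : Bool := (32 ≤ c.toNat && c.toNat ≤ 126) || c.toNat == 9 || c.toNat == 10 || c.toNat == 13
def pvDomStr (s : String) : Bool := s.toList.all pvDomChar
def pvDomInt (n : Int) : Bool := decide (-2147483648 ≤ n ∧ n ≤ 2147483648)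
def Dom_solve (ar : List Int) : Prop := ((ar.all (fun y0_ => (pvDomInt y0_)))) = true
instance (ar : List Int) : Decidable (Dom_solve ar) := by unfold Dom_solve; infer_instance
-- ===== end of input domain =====

-- B computes each rank directly as (number of elements <= it) - 1, replacing A's sort + last-index dict; alternative algorithm, not faster.


-- ===== PORT A =====
-- h[ar[i]] is ported as getD with default 0; exact here since ar[i] is always a key of h.
def solve (ar : List Int) : List Int :=
  let ar1 := PySem.List.sorted ar (fun x => x) false
  let h := (PySem.List.pyRange 0 (PySem.List.len ar1) 1).foldl
      (fun d i => d.insert (PySem.List.pyGetD ar1 i 0) i) (PySem.Dict.empty : PySem.Dict Int Int)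
  (PySem.List.pyRange 0 (PySem.List.len ar1) 1).foldl
      (fun res i => res ++ [h.getD (PySem.List.pyGetD ar i 0) 0]) []

-- ===== PORT B =====
def solve_alt (ar : List Int) : List Int :=
  ar.foldl (fun result a =>
    result ++ [(ar.foldl (fun c x => if x ≤ a then c + 1 else c) (0 : Int)) - 1]) []

-- ===== PRECONDITION & SPEC =====
def Spec_solve (ar : List Int) (out : List Int) : Prop := out = solve_alt ar
instance (ar : List Int) (out : List Int) : Decidable (Spec_solve ar out) := by unfold Spec_solve; infer_instance

-- ===== CLAIM (what is proved, stated in full; the proofs are below) =====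
def Claim_equal_solve : Prop := ∀ (ar : List Int), Dom_solve ar → Spec_solve ar (solve ar)

-- ===== LEMMAS AND PROOFS =====

-- appending-fold is a map
theorem foldl_append_singleton_eq_map {α β : Type} (g : α → β) (xs : List α) (acc : List β) :
    xs.foldl (fun res a => res ++ [g a]) acc = acc ++ xs.map g := by
  induction xs generalizing acc with
  | nil => simp
  | cons x xs ih => simp [List.foldl, ih]

-- B's inner counting fold is countP
theorem foldl_count_le (a : Int) (xs : List Int) (c : Int) :
    xs.foldl (fun c x => if x ≤ a then c + 1 else c) c
      = c + (xs.countP (fun x => decide (x ≤ a)) : Int) := by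
  induction xs generalizing c with
  | nil => simp
  | cons x xs ih =>
      simp only [List.foldl, List.countP_cons]
      by_cases h : x ≤ a <;> (simp [h, ih]; try ring)

-- the dict of last indices over a sorted list: lookup of a member a is countP (· ≤ a) - 1
theorem getD_lastIndexDict (s : List Int) (hs : s.Pairwise (· ≤ ·)) (a : Int) (ha : a ∈ s)
    (d0 : Int) :
    ((PySem.List.enumerate s 0).foldl (fun d p => d.insert p.2 p.1)
        (PySem.Dict.empty : PySem.Dict Int Int)).getD a d0
      = (s.countP (fun x => decide (x ≤ a)) : Int) - 1 := by
  induction s using List.reverseRecOn with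
  | nil => simp at ha
  | append_singleton s x ih =>
      have hpair := hs
      rw [List.pairwise_append] at hpair
      obtain ⟨hps, -, hsx⟩ := hpair
      rw [PySem.List.enumerate_append, List.foldl_append]
      simp only [PySem.List.enumerate, List.foldl]
      rw [PySem.Dict.getD_insert]
      by_cases hax : a = x
      · subst hax
        
        have hall : s.countP (fun x => decide (x ≤ a)) = s.length := by
          rw [List.countP_eq_length]
          intro y hy
          exact decide_eq_true (hsx y hy a (by simp))
        rw [List.countP_append, hall]
        simp
      · have has : a ∈ s := by
          rcases List.mem_append.mp ha with h | h
          · exact h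
          · simp at h; exact absurd h hax
        rw [if_neg hax, ih hps has]
        have hxa : ¬ (x ≤ a) := by
          intro hle
          have : a ≤ x := hsx a has x (by simp)
          exact hax (le_antisymm this hle)
        rw [List.countP_append]
        simp [hxa]

theorem solve_eq (ar : List Int) : solve ar = solve_alt ar := by
  unfold solve solve_alt
  simp only []
  set s := PySem.List.sorted ar (fun x => x) false with hsdef
  have hlen : s.length = ar.length := PySem.List.length_sorted ar (fun x => x) false
  have hperm : s.Perm ar := PySem.List.sorted_perm ar (fun x => x) false
  have hpw : s.Pairwise (· ≤ ·) := PySem.List.sorted_pairwise ar (fun x => x)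
  -- the dict loop is a fold over enumerate s
  have hdict : (PySem.List.pyRange 0 (PySem.List.len s) 1).foldl
      (fun d i => d.insert (PySem.List.pyGetD s i 0) i) (PySem.Dict.empty : PySem.Dict Int Int)
      = (PySem.List.enumerate s 0).foldl (fun d p => d.insert p.2 p.1)
        (PySem.Dict.empty : PySem.Dict Int Int) := by
    rw [PySem.List.enumerate_eq_map_pyRange s 0, List.foldl_map]
  rw [hdict]
  set h := (PySem.List.enumerate s 0).foldl (fun d p => d.insert p.2 p.1)
        (PySem.Dict.empty : PySem.Dict Int Int) with hh
  -- the result loop is a fold over ar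
  have hlen2 : PySem.List.len s = (ar.length : Int) := by
    simp [PySem.List.len, hlen]
  rw [hlen2]
  rw [PySem.List.foldl_pyRange_zero_pyGetD' ar 0 (fun res x => res ++ [h.getD x 0]) []]
  rw [foldl_append_singleton_eq_map, foldl_append_singleton_eq_map]
  simp only [List.nil_append]
  apply List.map_congr_left
  intro a ha
  have has : a ∈ s := (PySem.List.mem_sorted ar (fun x => x) false a).mpr ha
  rw [getD_lastIndexDict s hpw a has 0, foldl_count_le, hperm.countP_eq]
  ring

-- ===== VERDICT (by name: the statement is the Claim_ definition above) =====
theorem solve_spec : Claim_equal_solve := by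
  intro ar _
  unfold Spec_solve
  exact solve_eq ar
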